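-- pv_equiv track=rewrite | github.com/neukg/KAT-TSLF | load_wizard.py | to_seq2seq
-- ===== SOURCE A (Python) =====
-- SEP = '</s>'
--
-- def to_seq2seq(episodes):
--     samples = []
--     for epi in episodes:
--         history = []
--         for turn in epi:
--             ctx = turn['context'].replace('\n', ' ').strip()
--             res = turn['response'].replace('\n', ' ').strip()
--             history.append(ctx)
--             samples.append((SEP.join(history[-5:]), res))
--             history.append(res)
--     return samples
-- ===== SOURCE B (Python) =====
-- SEP = '</s>'
--
-- def to_seq2seq(episodes):
--     samples = []
--     for epi in episodes:
--         flat = []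
--         for turn in epi:
--             flat.append(turn['context'].replace('\n', ' ').strip())
--             flat.append(turn['response'].replace('\n', ' ').strip())
--         for i in range(len(epi)):
--             samples.append((SEP.join(flat[max(0, 2 * i - 4):2 * i + 1]), flat[2 * i + 1]))
--     return samples
-- ===== Notes on version B (the rewrite author's own statement) =====
-- stated objective: alternative
-- what changed: Replaces the incremental growing-history list with per-episode slicing of its last 5 elements by a two-pass shape: first build the flat cleaned-utterance array of the whole episode, then emit each pair by indexing fixed windows flat[max(0,2i-4):2i+1] and flat[2i+1].
import Mathlib
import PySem

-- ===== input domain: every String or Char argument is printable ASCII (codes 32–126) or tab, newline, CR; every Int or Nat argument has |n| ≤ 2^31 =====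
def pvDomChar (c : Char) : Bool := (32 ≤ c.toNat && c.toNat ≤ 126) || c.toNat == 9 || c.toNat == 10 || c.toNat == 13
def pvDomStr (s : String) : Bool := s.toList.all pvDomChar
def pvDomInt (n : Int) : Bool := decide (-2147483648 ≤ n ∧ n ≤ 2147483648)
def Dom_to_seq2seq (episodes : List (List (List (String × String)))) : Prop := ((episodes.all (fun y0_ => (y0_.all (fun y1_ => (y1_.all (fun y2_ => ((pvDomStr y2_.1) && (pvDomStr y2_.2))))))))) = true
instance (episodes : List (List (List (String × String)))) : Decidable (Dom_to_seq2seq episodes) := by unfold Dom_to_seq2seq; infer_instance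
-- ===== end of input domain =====

-- B builds each episode's flat cleaned-utterance array first and then indexes fixed windows
-- into it, instead of A's growing-history-plus-last-5-slice loop (alternative decomposition; same cost).

-- shared helpers: '</s>', first-match dict lookup (the dict is an assoc list), and
-- s.replace('\n', ' ').strip(), which both versions apply verbatim to each field
def pvSEP : String := "</s>"

def pvLookup (turn : List (String × String)) (k : String) : String :=
  (turn.lookup k).getD ""   -- total stand-in for turn[k]; Pre_ guarantees the key is present

def pvClean (s : String) : String := PySem.Str.strip (PySem.Str.replace s "\n" " ")

-- ===== PORT A =====
def to_seq2seq (episodes : List (List (List (String × String)))) : List (String × String) :=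
  episodes.foldl (fun samples epi =>
    (epi.foldl (fun (st : List String × List (String × String)) turn =>
        let ctx := pvClean (pvLookup turn "context")
        let res := pvClean (pvLookup turn "response")
        let history := st.1 ++ [ctx]
        (history ++ [res],
         st.2 ++ [(PySem.Str.join pvSEP (PySem.List.slice history (some (-5)) none), res)]))
      ([], samples)).2) []

-- ===== PORT B =====
def to_seq2seq_alt (episodes : List (List (List (String × String)))) : List (String × String) :=
  episodes.foldl (fun samples epi =>
    let flat := epi.foldl (fun f turn =>
      f ++ [pvClean (pvLookup turn "context"), pvClean (pvLookup turn "response")]) []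
    samples ++ (List.range epi.length).map (fun i =>
      (PySem.Str.join pvSEP ((flat.take (2 * i + 1)).drop (2 * i - 4)),
       flat.getD (2 * i + 1) ""))) []

-- ===== PRECONDITION & SPEC =====
-- Pre_: every turn dict has both keys 'context' and 'response' — exactly where A's
-- turn['context'] / turn['response'] do not raise KeyError.
def Pre_to_seq2seq (episodes : List (List (List (String × String)))) : Prop :=
  ∀ epi ∈ episodes, ∀ turn ∈ epi,
    "context" ∈ turn.map Prod.fst ∧ "response" ∈ turn.map Prod.fst

instance (episodes : List (List (List (String × String)))) : Decidable (Pre_to_seq2seq episodes) := by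
  unfold Pre_to_seq2seq; infer_instance

def pvWitness_to_seq2seq : (List (List (List (String × String)))) :=
  [[[("context", "hi\nthere "), ("response", "ok")],
    [("context", "and?"), ("response", " fine ")]]]

def Spec_to_seq2seq (episodes : List (List (List (String × String)))) (out : List (String × String)) : Prop := out = to_seq2seq_alt episodes
instance (episodes : List (List (List (String × String)))) (out : List (String × String)) : Decidable (Spec_to_seq2seq episodes out) := by unfold Spec_to_seq2seq; infer_instance

-- ===== CLAIM (what is proved, stated in full; the proofs are below) =====
def Claim_equal_to_seq2seq : Prop := ∀ (episodes : List (List (List (String × String)))), Dom_to_seq2seq episodes → Pre_to_seq2seq episodes → Spec_to_seq2seq episodes (to_seq2seq episodes)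

-- ===== LEMMAS AND PROOFS =====

-- the cleaned (context, response) pair of one turn, and the flat array of an episode
def pvC2 (turn : List (String × String)) : List String :=
  [pvClean (pvLookup turn "context"), pvClean (pvLookup turn "response")]

def pvFlat (epi : List (List (String × String))) : List String := epi.flatMap pvC2

-- the sample emitted for turn i, read off a flat array with a prefix of length L already consumed
def pvWin (flat : List String) (L i : Nat) : String × String :=
  (PySem.Str.join pvSEP ((flat.take (L + 2 * i + 1)).drop (L + 2 * i + 1 - 5)),
   flat.getD (L + 2 * i + 1) "")

lemma pvFlat_cons (t : List (String × String)) (ts : List (List (String × String))) :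
    pvFlat (t :: ts) = pvC2 t ++ pvFlat ts := by
  simp [pvFlat, pvC2]

lemma pvWin_shift (flat : List String) (L i : Nat) :
    pvWin flat (L + 2) i = pvWin flat L (i + 1) := by
  have h1 : L + 2 + 2 * i + 1 = L + 2 * (i + 1) + 1 := by omega
  simp [pvWin, h1]

lemma map_pvWin_shift (flat : List String) (L n : Nat) :
    (List.range n).map (pvWin flat (L + 2)) = (List.range n).map (pvWin flat L ∘ Nat.succ) :=
  List.map_congr_left (fun i _ => pvWin_shift flat L i)

lemma pvWin_head (h : List String) (c r : String) (rest : List String) :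
    pvWin (h ++ (c :: r :: rest)) h.length 0
      = (PySem.Str.join pvSEP ((h ++ [c]).drop (h.length + 1 - 5)), r) := by
  have htake : List.take (h.length + 2 * 0 + 1) (h ++ (c :: r :: rest)) = h ++ [c] := by
    rw [List.take_append]
    simp
  have hget : (h ++ (c :: r :: rest)).getD (h.length + 2 * 0 + 1) "" = r := by
    have h1 : (h ++ [c]).length = h.length + 2 * 0 + 1 := by simp
    have h2 : ((h ++ [c]) ++ (r :: rest)).getD (h ++ [c]).length "" = r := by
      simp [List.getD]
    rw [h1] at h2
    rw [List.append_assoc, List.singleton_append] at h2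
    exact h2
  have h5 : h.length + 2 * 0 + 1 - 5 = h.length + 1 - 5 := by omega
  rw [pvWin, htake, hget, h5]

lemma inner_A (ts : List (List (String × String))) (h : List String)
    (s : List (String × String)) :
    ts.foldl (fun (st : List String × List (String × String)) turn =>
        let ctx := pvClean (pvLookup turn "context")
        let res := pvClean (pvLookup turn "response")
        let history := st.1 ++ [ctx]
        (history ++ [res],
         st.2 ++ [(PySem.Str.join pvSEP (PySem.List.slice history (some (-5)) none), res)]))
      (h, s)
    = (h ++ pvFlat ts,
       s ++ (List.range ts.length).map (pvWin (h ++ pvFlat ts) h.length)) := by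
  induction ts generalizing h s with
  | nil => simp [pvFlat]
  | cons t ts ih =>
      rw [List.foldl_cons]
      refine (ih ((h ++ [pvClean (pvLookup t "context")]) ++ [pvClean (pvLookup t "response")])
        (s ++ [(PySem.Str.join pvSEP
          (PySem.List.slice (h ++ [pvClean (pvLookup t "context")]) (some (-5)) none),
          pvClean (pvLookup t "response"))])).trans ?_
      have hassoc : ((h ++ [pvClean (pvLookup t "context")]) ++ [pvClean (pvLookup t "response")])
            ++ pvFlat ts
          = h ++ (pvClean (pvLookup t "context") :: pvClean (pvLookup t "response") :: pvFlat ts) := by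
        simp
      have hflat : h ++ (pvClean (pvLookup t "context") :: pvClean (pvLookup t "response") :: pvFlat ts)
          = h ++ pvFlat (t :: ts) := by
        simp [pvFlat_cons, pvC2]
      rw [← hflat, ← hassoc]
      refine Prod.ext rfl ?_
      have hslice : PySem.List.slice (h ++ [pvClean (pvLookup t "context")]) (some (-5)) none
          = (h ++ [pvClean (pvLookup t "context")]).drop (h.length + 1 - 5) := by
        rw [PySem.List.slice_from_neg_ofNat _ 5 (by omega)]
        simp
      have hlen2 : ((h ++ [pvClean (pvLookup t "context")]) ++ [pvClean (pvLookup t "response")]).length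
          = h.length + 2 := by simp
      rw [hlen2, List.length_cons, List.range_succ_eq_map, List.map_cons, List.map_map]
      rw [hassoc, pvWin_head, hslice]
      rw [List.append_assoc s, List.singleton_append, map_pvWin_shift]

lemma inner_B (ts : List (List (String × String))) (f : List String) :
    ts.foldl (fun f turn =>
      f ++ [pvClean (pvLookup turn "context"), pvClean (pvLookup turn "response")]) f
    = f ++ pvFlat ts := by
  induction ts generalizing f with
  | nil => simp [pvFlat]
  | cons t ts ih => simp [pvFlat_cons, ih, pvC2]

lemma win_zero (flat : List String) (i : Nat) :
    pvWin flat 0 i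
      = (PySem.Str.join pvSEP ((flat.take (2 * i + 1)).drop (2 * i - 4)),
         flat.getD (2 * i + 1) "") := by
  have h1 : 0 + 2 * i + 1 = 2 * i + 1 := by omega
  have h2 : 2 * i + 1 - 5 = 2 * i - 4 := by omega
  simp [pvWin, h2]

lemma outer (eps : List (List (List (String × String)))) (acc : List (String × String)) :
    eps.foldl (fun samples epi =>
      (epi.foldl (fun (st : List String × List (String × String)) turn =>
          let ctx := pvClean (pvLookup turn "context")
          let res := pvClean (pvLookup turn "response")
          let history := st.1 ++ [ctx]
          (history ++ [res],
           st.2 ++ [(PySem.Str.join pvSEP (PySem.List.slice history (some (-5)) none), res)]))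
        ([], samples)).2) acc
    = eps.foldl (fun samples epi =>
        let flat := epi.foldl (fun f turn =>
          f ++ [pvClean (pvLookup turn "context"), pvClean (pvLookup turn "response")]) []
        samples ++ (List.range epi.length).map (fun i =>
          (PySem.Str.join pvSEP ((flat.take (2 * i + 1)).drop (2 * i - 4)),
           flat.getD (2 * i + 1) ""))) acc := by
  induction eps generalizing acc with
  | nil => rfl
  | cons e es ih =>
      simp only [List.foldl_cons]
      rw [inner_A e [] acc, inner_B e []]
      simp only [List.nil_append, List.length_nil]
      have : (List.range e.length).map (pvWin (pvFlat e) 0)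
          = (List.range e.length).map (fun i =>
              (PySem.Str.join pvSEP (((pvFlat e).take (2 * i + 1)).drop (2 * i - 4)),
               (pvFlat e).getD (2 * i + 1) "")) := by
        refine List.map_congr_left (fun i _ => ?_)
        exact win_zero (pvFlat e) i
      rw [this]
      exact ih _

-- ===== VERDICT (by name: the statement is the Claim_ definition above) =====
theorem to_seq2seq_spec : Claim_equal_to_seq2seq := by
  intro eps _ _
  unfold Spec_to_seq2seq to_seq2seq to_seq2seq_alt
  exact outer eps []
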